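-- pv_equiv track=rewrite | github.com/PapaPiotr/EZDraw | play_functions.py | drawBoard
-- ===== SOURCE A (Python) =====
-- def drawBoard(position):
--     board = []
--     row = ''
--     for p in position:
--         if p != '/':
--             try:
--                 p = int(p)
--                 while p > 0:
--                     row += '|   '
--                     p -= 1
--
--             except:
--                 row += '| ' + p + ' '
--         else:
--             row += '|'
--             board.append(row)
--             row = ""
--
--     row += '|'
--     board.append(row)
--     return(board)
-- ===== SOURCE B (Python) =====
-- def drawBoard(position):
--     rows = []
--     parts = ['|']
--     for c in reversed(position):
--         if c == '/':
--             parts.reverse()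
--             rows.append(''.join(parts))
--             parts = ['|']
--         else:
--             try:
--                 parts.append('|   ' * int(c))
--             except ValueError:
--                 parts.append('| ' + c + ' ')
--     parts.reverse()
--     rows.append(''.join(parts))
--     rows.reverse()
--     return rows
-- ===== Notes on version B (the rewrite author's own statement) =====
-- stated objective: alternative
-- what changed: A scans left-to-right, growing the current row string by appending and flushing rows at each separator; B traverses the string from the END, collecting each row's cell pieces back-to-front in a list that is reversed and joined per row (digit expansion by string multiplication instead of A's counting while-loop), gathering rows last-first and reversing the board once at the end.
import Mathlib
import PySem

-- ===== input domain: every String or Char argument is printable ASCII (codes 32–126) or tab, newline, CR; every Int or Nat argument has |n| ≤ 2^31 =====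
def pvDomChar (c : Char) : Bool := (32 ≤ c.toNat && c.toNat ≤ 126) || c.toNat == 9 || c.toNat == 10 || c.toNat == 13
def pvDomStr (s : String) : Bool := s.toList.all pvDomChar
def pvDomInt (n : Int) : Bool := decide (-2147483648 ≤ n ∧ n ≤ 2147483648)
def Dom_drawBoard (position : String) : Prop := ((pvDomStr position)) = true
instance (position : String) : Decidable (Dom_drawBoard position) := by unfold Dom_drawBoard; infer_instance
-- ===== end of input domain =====

-- B traverses the string from the END, collecting each row's cell pieces back-to-front
-- in a list joined per row (digit expansion by string replication instead of A's counting
-- while-loop), rows gathered last-first and reversed once; alternative traversal, same cost.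

-- ===== PORT A =====
-- `while p > 0: row += '|   '; p -= 1` — appends once per unit of p (p ≤ 0 does nothing,
-- matching toNat = 0).
def drawBoardWhile : Nat → String → String
  | 0, row => row
  | n+1, row => drawBoardWhile n (row ++ "|   ")

def drawBoardLoop : List Char → List String → String → List String × String
  | [], board, row => (board, row)
  | p :: ps, board, row =>
    if p ≠ '/' then
      match PySem.Int.ofChars? [p] with
      | some n => drawBoardLoop ps board (drawBoardWhile n.toNat row)
      | none => drawBoardLoop ps board (row ++ "| " ++ String.ofList [p] ++ " ")
    else drawBoardLoop ps (board ++ [row ++ "|"]) ""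

def drawBoard (position : String) : List String :=
  (drawBoardLoop position.toList [] "").1 ++ [(drawBoardLoop position.toList [] "").2 ++ "|"]

-- ===== PORT B =====
-- one step of B's loop body, for one character of reversed(position); state = (rows, parts)
def drawBoardStep (c : Char) (st : List String × List String) : List String × List String :=
  if c = '/' then (st.1 ++ [String.join st.2.reverse], ["|"])
  else
    match PySem.Int.ofChars? [c] with
    | some n => (st.1, st.2 ++ [String.join (List.replicate n.toNat "|   ")])  -- '|   ' * int(c)
    | none => (st.1, st.2 ++ ["| " ++ String.ofList [c] ++ " "])

def drawBoardRloop : List Char → (List String × List String) → List String × List String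
  | [], st => st
  | c :: cs, st => drawBoardRloop cs (drawBoardStep c st)

def drawBoard_alt (position : String) : List String :=
  ((drawBoardRloop position.toList.reverse ([], ["|"])).1
    ++ [String.join (drawBoardRloop position.toList.reverse ([], ["|"])).2.reverse]).reverse

-- ===== PRECONDITION & SPEC =====
def Spec_drawBoard (position : String) (out : List String) : Prop := out = drawBoard_alt position
instance (position : String) (out : List String) : Decidable (Spec_drawBoard position out) := by unfold Spec_drawBoard; infer_instance

-- ===== CLAIM (what is proved, stated in full; the proofs are below) =====
def Claim_equal_drawBoard : Prop := ∀ (position : String), Dom_drawBoard position → Spec_drawBoard position (drawBoard position)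

-- ===== LEMMAS AND PROOFS =====

/-- What the while-loop appends for a digit of value n. -/
def pvRep : Nat → String
  | 0 => ""
  | n+1 => "|   " ++ pvRep n

/-- What one non-separator character contributes to the current row. -/
def pvPiece (c : Char) : String :=
  match PySem.Int.ofChars? [c] with
  | some n => pvRep n.toNat
  | none => "| " ++ String.ofList [c] ++ " "

/-- Row contents (without the closing border) of one segment. -/
def pvRender : List Char → String
  | [] => ""
  | c :: cs => pvPiece c ++ pvRender cs

/-- Split on the row separator, keeping empty segments (never returns []). -/
def pvSegs : List Char → List (List Char)
  | [] => [[]]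
  | c :: cs =>
    if c = '/' then [] :: pvSegs cs
    else match pvSegs cs with
         | [] => [[c]]
         | s :: ss => (c :: s) :: ss

lemma pvSegs_ne_nil (cs : List Char) : pvSegs cs ≠ [] := by
  cases cs with
  | nil => simp [pvSegs]
  | cons c cs =>
    simp only [pvSegs]
    split_ifs
    · simp
    · rcases h : pvSegs cs with _ | ⟨s, ss⟩ <;> simp

/-- The rows A will produce from the rest of the input, given the current row prefix. -/
def pvRows (row : String) (cs : List Char) : List String :=
  match pvSegs cs with
  | [] => []
  | s :: ss => (row ++ pvRender s ++ "|") :: ss.map (fun s => pvRender s ++ "|")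

lemma drawBoardWhile_eq (n : Nat) : ∀ row, drawBoardWhile n row = row ++ pvRep n := by
  induction n with
  | zero => intro row; simp [drawBoardWhile, pvRep]
  | succ n ih =>
    intro row
    simp [drawBoardWhile, pvRep, ih, String.append_assoc]

lemma pvRows_cons (row : String) (c : Char) (cs : List Char) (hc : c ≠ '/') :
    pvRows row (c :: cs) = pvRows (row ++ pvPiece c) cs := by
  rcases h : pvSegs cs with _ | ⟨s, ss⟩
  · exact absurd h (pvSegs_ne_nil cs)
  · simp [pvRows, pvSegs, hc, h, pvRender, String.append_assoc]

lemma pvRows_slash (row : String) (cs : List Char) :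
    pvRows row ('/' :: cs) = (row ++ "|") :: pvRows "" cs := by
  rcases h : pvSegs cs with _ | ⟨s, ss⟩
  · exact absurd h (pvSegs_ne_nil cs)
  · simp [pvRows, pvSegs, h, pvRender]

lemma drawBoardLoop_eq (cs : List Char) : ∀ board row,
    (drawBoardLoop cs board row).1 ++ [(drawBoardLoop cs board row).2 ++ "|"]
      = board ++ pvRows row cs := by
  induction cs with
  | nil =>
    intro board row
    simp [drawBoardLoop, pvRows, pvSegs, pvRender]
  | cons c cs ih =>
    intro board row
    by_cases hc : c = '/'
    · subst hc
      simp only [drawBoardLoop, ne_eq, not_true_eq_false, if_false, ih, pvRows_slash]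
      simp
    · rcases hint : PySem.Int.ofChars? [c] with _ | n
      · simp only [drawBoardLoop, ne_eq, hc, not_false_eq_true, if_true, hint, ih,
          pvRows_cons _ _ _ hc, pvPiece, String.append_assoc]
      · simp only [drawBoardLoop, ne_eq, hc, not_false_eq_true, if_true, hint, ih,
          pvRows_cons _ _ _ hc, pvPiece, drawBoardWhile_eq]

lemma pvJoin_cons (s : String) (l : List String) :
    String.join (s :: l) = s ++ String.join l := by
  have h : ∀ (l : List String) (a : String),
      l.foldl (fun r t => r ++ t) a = a ++ l.foldl (fun r t => r ++ t) "" := by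
    intro l
    induction l with
    | nil => intro a; simp
    | cons x xs ih =>
      intro a
      simp only [List.foldl_cons]
      rw [ih (a ++ x), ih ("" ++ x)]
      simp [String.append_assoc]
  simp only [String.join, List.foldl_cons]
  rw [h l ("" ++ s)]
  simp

lemma pvJoin_rep (n : Nat) :
    String.join (List.replicate n "|   ") = pvRep n := by
  induction n with
  | zero => simp [pvRep, String.join]
  | succ n ih => simp [List.replicate_succ, pvJoin_cons, ih, pvRep]

lemma pvJoinPieces (s : List Char) :
    String.join (s.map pvPiece ++ ["|"]) = pvRender s ++ "|" := by
  induction s with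
  | nil => simp [pvRender, String.join]
  | cons c cs ih => simp [pvJoin_cons, ih, pvRender, String.append_assoc]

lemma pvRloop_append (xs ys : List Char) (st : List String × List String) :
    drawBoardRloop (xs ++ ys) st = drawBoardRloop ys (drawBoardRloop xs st) := by
  induction xs generalizing st with
  | nil => simp [drawBoardRloop]
  | cons x xs ih => simp [drawBoardRloop, ih]

/-- B's reversed loop computes, for input cs, the rows of cs last-first together with
the first row's pieces collected back-to-front behind the closing border. -/
lemma pvRloop_eq (cs : List Char) : ∀ s ss, pvSegs cs = s :: ss →
    drawBoardRloop cs.reverse ([], ["|"])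
      = ((ss.map (fun t => pvRender t ++ "|")).reverse, "|" :: (s.map pvPiece).reverse) := by
  induction cs with
  | nil =>
    intro s ss h
    simp only [pvSegs] at h
    injection h with h1 h2
    subst h1; subst h2
    simp [drawBoardRloop]
  | cons c cs ih =>
    intro s ss h
    have hrev : (c :: cs).reverse = cs.reverse ++ [c] := by simp
    rw [hrev, pvRloop_append]
    rcases hcs : pvSegs cs with _ | ⟨s', ss'⟩
    · exact absurd hcs (pvSegs_ne_nil cs)
    · rw [ih s' ss' hcs]
      by_cases hc : c = '/'
      · subst hc
        simp only [pvSegs, hcs] at h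
        injection h with h1 h2
        subst h1; subst h2
        simp [drawBoardRloop, drawBoardStep, pvJoinPieces]
      · simp only [pvSegs, if_neg hc, hcs] at h
        injection h with h1 h2
        subst h1; subst h2
        simp only [drawBoardRloop, drawBoardStep]
        rcases hint : PySem.Int.ofChars? [c] with _ | n
        · simp [hc, pvPiece, hint]
        · simp [hc, pvPiece, hint, pvJoin_rep]

lemma drawBoard_alt_eq (position : String) :
    drawBoard_alt position
      = (pvSegs position.toList).map (fun s => pvRender s ++ "|") := by
  rcases h : pvSegs position.toList with _ | ⟨s, ss⟩
  · exact absurd h (pvSegs_ne_nil position.toList)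
  · unfold drawBoard_alt
    rw [pvRloop_eq position.toList s ss h]
    simp [pvJoinPieces]

lemma pvRows_empty_eq_map (cs : List Char) :
    pvRows "" cs = (pvSegs cs).map (fun s => pvRender s ++ "|") := by
  rcases hs : pvSegs cs with _ | ⟨s, ss⟩
  · exact absurd hs (pvSegs_ne_nil cs)
  · simp [pvRows, hs]

-- ===== VERDICT (by name: the statement is the Claim_ definition above) =====
theorem drawBoard_spec : Claim_equal_drawBoard := by
  intro position _
  unfold Spec_drawBoard drawBoard
  rw [drawBoardLoop_eq, drawBoard_alt_eq, pvRows_empty_eq_map]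
  simp
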